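-- pv_equiv track=rewrite | github.com/GuilhermeAureliano/programacao-1 | unidade10/colegas_de_sala.py | colegas_de_sala
-- ===== SOURCE A (Python) =====
-- def colegas_de_sala(salasprofs, nome):
--     referencia = 0
--     for k, v in salasprofs.items():
--         if nome == k:
--             referencia = v
--     lista = []
--     for k, v in salasprofs.items():
--         if v == referencia and k != nome:
--             lista += [k]
--     return lista
-- ===== SOURCE B (Python) =====
-- def colegas_de_sala(salasprofs, nome):
--     index = {}
--     for k, v in salasprofs.items():
--         index.setdefault(v, []).append(k)
--     referencia = salasprofs.get(nome, 0)
--     return [k for k in index.get(referencia, []) if k != nome]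
-- ===== Notes on version B (the rewrite author's own statement) =====
-- stated objective: alternative
-- what changed: Replaces A's second full scan (and its last-match reference scan) with a single grouping pass building an inverted index room->names, a direct dict .get for the reference room, and a filter over only that group.
import Mathlib
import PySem

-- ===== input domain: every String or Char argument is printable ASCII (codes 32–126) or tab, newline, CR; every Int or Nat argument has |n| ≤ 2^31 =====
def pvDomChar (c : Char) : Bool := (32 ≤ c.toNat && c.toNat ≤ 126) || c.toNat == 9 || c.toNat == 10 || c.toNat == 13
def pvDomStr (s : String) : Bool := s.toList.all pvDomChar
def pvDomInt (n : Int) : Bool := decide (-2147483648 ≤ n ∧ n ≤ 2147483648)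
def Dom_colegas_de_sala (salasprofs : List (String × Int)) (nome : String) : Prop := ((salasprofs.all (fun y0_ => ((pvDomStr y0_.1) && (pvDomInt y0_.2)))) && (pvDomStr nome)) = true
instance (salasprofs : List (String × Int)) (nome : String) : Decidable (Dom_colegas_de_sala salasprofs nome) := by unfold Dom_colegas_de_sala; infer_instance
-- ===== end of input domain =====

-- B replaces A's two full scans with one grouping pass (inverted index room -> names),
-- a direct dict lookup for the reference room, and a filter over only that group.


-- ===== PORT A =====
-- first loop: 'referencia' ends as the LAST value whose key equals nome (0 if none);
-- second loop: collect keys whose value equals referencia and key ≠ nome.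
def colegas_de_sala (salasprofs : List (String × Int)) (nome : String) : List String :=
  let referencia : Int := salasprofs.foldl (fun r p => if nome == p.1 then p.2 else r) 0
  salasprofs.foldl (fun lista p => if p.2 == referencia && p.1 != nome then lista ++ [p.1] else lista) []

-- ===== PORT B =====
-- one grouping pass building index : room -> list of names, then a direct lookup and a filter.
def colegas_de_sala_alt (salasprofs : List (String × Int)) (nome : String) : List String :=
  let index : PySem.Dict Int (List String) :=
    salasprofs.foldl (fun d p => d.modify p.2 [] (· ++ [p.1])) PySem.Dict.empty
  let referencia : Int := (PySem.Dict.mk salasprofs).getD nome 0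
  (index.getD referencia []).filter (fun k => k != nome)

-- ===== PRECONDITION & SPEC =====
-- salasprofs represents a Python dict, whose keys are necessarily unique; association
-- lists with duplicate keys do not arise from A's dict argument, so we require Nodup keys.
def Pre_colegas_de_sala (salasprofs : List (String × Int)) (nome : String) : Prop :=
  (salasprofs.map Prod.fst).Nodup
instance (salasprofs : List (String × Int)) (nome : String) : Decidable (Pre_colegas_de_sala salasprofs nome) := by unfold Pre_colegas_de_sala; infer_instance
def pvWitness_colegas_de_sala : (List (String × Int)) × String :=
  ([("ana", 1), ("bob", 1), ("carla", 2)], "ana")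
def Spec_colegas_de_sala (salasprofs : List (String × Int)) (nome : String) (out : List String) : Prop := out = colegas_de_sala_alt salasprofs nome
instance (salasprofs : List (String × Int)) (nome : String) (out : List String) : Decidable (Spec_colegas_de_sala salasprofs nome out) := by unfold Spec_colegas_de_sala; infer_instance

-- ===== CLAIM (what is proved, stated in full; the proofs are below) =====
def Claim_equal_colegas_de_sala : Prop := ∀ (salasprofs : List (String × Int)) (nome : String), Dom_colegas_de_sala salasprofs nome → Pre_colegas_de_sala salasprofs nome → Spec_colegas_de_sala salasprofs nome (colegas_de_sala salasprofs nome)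

-- ===== LEMMAS AND PROOFS =====

-- A loop that only overwrites on a matching key keeps its accumulator when the key is absent.
theorem fold_keep (nome : String) (l : List (String × Int)) (a : Int)
    (h : nome ∉ l.map Prod.fst) :
    l.foldl (fun r p => if nome == p.1 then p.2 else r) a = a := by
  induction l generalizing a with
  | nil => rfl
  | cons x xs ih =>
    simp only [List.map_cons, List.mem_cons, not_or] at h
    rw [List.foldl_cons, if_neg (by simpa using h.1)]
    exact ih _ h.2

-- A's first loop (last match, default 0) equals B's dict lookup (first match) when keys are unique.
theorem ref_eq (salasprofs : List (String × Int)) (nome : String)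
    (h : (salasprofs.map Prod.fst).Nodup) :
    salasprofs.foldl (fun r p => if nome == p.1 then p.2 else r) 0
      = (PySem.Dict.mk salasprofs).getD nome 0 := by
  induction salasprofs with
  | nil => rfl
  | cons x xs ih =>
    simp only [List.map_cons, List.nodup_cons] at h
    rw [List.foldl_cons, PySem.Dict.getD_eq_get?_getD, PySem.Dict.get?_mk_cons]
    by_cases hx : x.1 = nome
    · rw [if_pos (show (nome == x.1) = true by simp [hx]),
        if_pos (show (x.1 == nome) = true by simp [hx]), Option.getD_some]
      exact fold_keep nome xs x.2 (by simpa [hx] using h.1)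
    · rw [if_neg (show ¬ (nome == x.1) = true by simp [Ne.symm hx]),
        if_neg (show ¬ (x.1 == nome) = true by simp [hx]),
        ← PySem.Dict.getD_eq_get?_getD]
      exact ih h.2

-- B's grouping pass, looked up at any room r, yields the names whose room is r, in order.
theorem index_getD (salasprofs : List (String × Int)) (r : Int) :
    ((salasprofs.foldl (fun d p => d.modify p.2 [] (· ++ [p.1])) PySem.Dict.empty).getD r [])
      = (salasprofs.filter (fun p => p.2 == r)).map Prod.fst := by
  have h := PySem.Dict.getD_foldl_modify_append (salasprofs.map Prod.swap)
    (PySem.Dict.empty (κ := Int) (ν := List String)) r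
  rw [List.foldl_map] at h
  simp only [Prod.fst_swap, Prod.snd_swap, PySem.Dict.getD_empty, List.nil_append] at h
  rw [h, List.filter_map]
  simp [Function.comp_def]

-- ===== VERDICT (by name: the statement is the Claim_ definition above) =====
theorem colegas_de_sala_spec : Claim_equal_colegas_de_sala := by
  intro sp nome _ hpre
  unfold Spec_colegas_de_sala colegas_de_sala colegas_de_sala_alt
  simp only
  rw [ref_eq sp nome hpre, PySem.List.foldl_append_if, index_getD, List.filter_map]
  simp [Function.comp_def, Bool.and_comm]
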